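-- pv_equiv track=rewrite | github.com/HamiGames/Lucid | infrastructure/containers/lib_search_and_inject.py | iter_run_blocks
-- ===== SOURCE A (Python) =====
-- from typing import Iterable
--
-- def iter_run_blocks(text: str) -> Iterable[str]:
--     """Yield RUN instruction bodies (line-continued with \\)."""
--     lines = text.splitlines()
--     i = 0
--     n = len(lines)
--     while i < n:
--         raw = lines[i]
--         stripped = raw.lstrip()
--         if stripped.upper().startswith("RUN"):
--             chunk = [raw]
--             i += 1
--             while i < n and chunk[-1].rstrip().endswith("\\"):
--                 chunk.append(lines[i])
--                 i += 1
--             yield "\n".join(chunk)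
--             continue
--         i += 1
-- ===== SOURCE B (Python) =====
-- def iter_run_blocks(text: str):
--     """Yield RUN instruction bodies (line-continued with \\) — flat one-pass state machine."""
--     accum = None
--     for line in text.splitlines():
--         if accum is not None:
--             accum.append(line)
--             if not line.rstrip().endswith("\\"):
--                 yield "\n".join(accum)
--                 accum = None
--         else:
--             if line.lstrip().upper().startswith("RUN"):
--                 if line.rstrip().endswith("\\"):
--                     accum = [line]
--                 else:
--                     yield "\n".join([line])
--     if accum is not None:
--         yield "\n".join(accum)
-- ===== Notes on version B (the rewrite author's own statement) =====
-- stated objective: simpler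
-- what changed: Replaced A's index-driven outer while-loop with a nested inner continuation while-loop by a single flat pass over splitlines() carrying an optional accumulator (None outside a RUN block), flushing the accumulator when a line has no trailing backslash and once after the loop.
import Mathlib
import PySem

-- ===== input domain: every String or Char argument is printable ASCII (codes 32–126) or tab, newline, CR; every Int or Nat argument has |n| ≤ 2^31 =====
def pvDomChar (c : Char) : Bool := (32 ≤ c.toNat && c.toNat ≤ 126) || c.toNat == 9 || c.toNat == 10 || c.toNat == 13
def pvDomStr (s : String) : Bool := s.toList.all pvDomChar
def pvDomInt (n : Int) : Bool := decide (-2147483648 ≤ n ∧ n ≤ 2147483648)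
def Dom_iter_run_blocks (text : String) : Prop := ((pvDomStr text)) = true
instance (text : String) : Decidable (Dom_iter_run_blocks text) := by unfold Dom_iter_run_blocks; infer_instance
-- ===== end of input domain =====

-- B replaces A's index-driven outer while-loop with a nested inner while-loop by one
-- flat pass over the lines carrying an optional accumulator (objective: simpler decomposition).

-- ===== PORT A =====
-- inner while: collect continuation lines while chunk[-1].rstrip().endswith("\").
-- fuel = remaining loop-iteration budget, a pure totality device: the initial call
-- passes lines.length, which always suffices since i increases each iteration.
def iter_run_blocks_inner (lines : List String) :
    Nat → Nat → List String → List String × Nat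
  | 0, i, chunk => (chunk, i)
  | fuel + 1, i, chunk =>
    if h : i < lines.length ∧
        PySem.Str.endswith (PySem.Str.rstrip chunk.getLast!) "\\" = true then
      iter_run_blocks_inner lines fuel (i + 1) (chunk ++ [lines[i]])
    else (chunk, i)

-- outer while over index i (same fuel device; i strictly increases each iteration)
def iter_run_blocks_outer (lines : List String) : Nat → Nat → List String
  | 0, _ => []
  | fuel + 1, i =>
    if h : i < lines.length then
      let raw := lines[i]
      let stripped := PySem.Str.lstrip raw
      if PySem.Str.startswith (PySem.Str.upper stripped) "RUN" then
        let p := iter_run_blocks_inner lines lines.length (i + 1) [raw]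
        PySem.Str.join "\n" p.1 :: iter_run_blocks_outer lines fuel p.2
      else
        iter_run_blocks_outer lines fuel (i + 1)
    else []

def iter_run_blocks (text : String) : List String :=
  let lines := PySem.Str.splitlines text
  iter_run_blocks_outer lines lines.length 0

-- ===== PORT B =====
-- one step of the flat state machine: state = (optional open block, output so far)
def iter_run_blocks_step (s : Option (List String) × List String) (line : String) :
    Option (List String) × List String :=
  match s with
  | (some accum, out) =>
      let accum := accum ++ [line]
      if PySem.Str.endswith (PySem.Str.rstrip line) "\\" then (some accum, out)
      else (none, out ++ [PySem.Str.join "\n" accum])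
  | (none, out) =>
      if PySem.Str.startswith (PySem.Str.upper (PySem.Str.lstrip line)) "RUN" then
        if PySem.Str.endswith (PySem.Str.rstrip line) "\\" then (some [line], out)
        else (none, out ++ [PySem.Str.join "\n" [line]])
      else (none, out)

-- flush a trailing unterminated block
def iter_run_blocks_finish : Option (List String) × List String → List String
  | (some accum, out) => out ++ [PySem.Str.join "\n" accum]
  | (none, out) => out

def iter_run_blocks_alt (text : String) : List String :=
  iter_run_blocks_finish
    ((PySem.Str.splitlines text).foldl iter_run_blocks_step (none, []))

-- ===== PRECONDITION & SPEC =====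
def Spec_iter_run_blocks (text : String) (out : List String) : Prop := out = iter_run_blocks_alt text
instance (text : String) (out : List String) : Decidable (Spec_iter_run_blocks text out) := by unfold Spec_iter_run_blocks; infer_instance

-- ===== CLAIM (what is proved, stated in full; the proofs are below) =====
def Claim_equal_iter_run_blocks : Prop := ∀ (text : String), Dom_iter_run_blocks text → Spec_iter_run_blocks text (iter_run_blocks text)

-- ===== LEMMAS AND PROOFS =====

-- the inner loop never moves the index backwards
theorem iter_run_blocks_inner_le (lines : List String) :
    ∀ (fuel i : Nat) (chunk : List String),
    i ≤ (iter_run_blocks_inner lines fuel i chunk).2 := by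
  intro fuel
  induction fuel with
  | zero => intro i chunk; simp [iter_run_blocks_inner]
  | succ fuel ih =>
      intro i chunk
      rw [iter_run_blocks_inner]
      split
      · exact le_trans (Nat.le_succ i) (ih _ _)
      · simp

-- if the loop condition fails, any fuel returns immediately
theorem iter_run_blocks_inner_stop (lines : List String) (fuel i : Nat)
    (chunk : List String)
    (h : ¬(i < lines.length ∧
      PySem.Str.endswith (PySem.Str.rstrip chunk.getLast!) "\\" = true)) :
    iter_run_blocks_inner lines fuel i chunk = (chunk, i) := by
  cases fuel with
  | zero => rfl
  | succ fuel => rw [iter_run_blocks_inner, dif_neg h]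

-- any two sufficient fuels compute the same inner-loop result
theorem iter_run_blocks_inner_fuel (lines : List String) :
    ∀ (f g i : Nat) (chunk : List String), lines.length ≤ i + f → lines.length ≤ i + g →
    iter_run_blocks_inner lines f i chunk = iter_run_blocks_inner lines g i chunk := by
  intro f
  induction f with
  | zero =>
      intro g i chunk hf _
      cases g with
      | zero => rfl
      | succ g =>
          rw [iter_run_blocks_inner, iter_run_blocks_inner, dif_neg (by omega)]
  | succ f ih =>
      intro g i chunk hf hg
      cases g with
      | zero =>
          rw [iter_run_blocks_inner, iter_run_blocks_inner, dif_neg (by omega)]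
      | succ g =>
          rw [iter_run_blocks_inner, iter_run_blocks_inner]
          split
          · exact ih g (i + 1) _ (by omega) (by omega)
          · rfl

-- any two sufficient fuels compute the same outer-loop result
theorem iter_run_blocks_outer_fuel (lines : List String) :
    ∀ (f g i : Nat), lines.length ≤ i + f → lines.length ≤ i + g →
    iter_run_blocks_outer lines f i = iter_run_blocks_outer lines g i := by
  intro f
  induction f with
  | zero =>
      intro g i hf _
      cases g with
      | zero => rfl
      | succ g =>
          rw [iter_run_blocks_outer, iter_run_blocks_outer, dif_neg (by omega)]
  | succ f ih =>
      intro g i hf hg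
      cases g with
      | zero =>
          rw [iter_run_blocks_outer, iter_run_blocks_outer, dif_neg (by omega)]
      | succ g =>
          simp only [iter_run_blocks_outer]
          split
          · rename_i hi
            split
            · have hle := iter_run_blocks_inner_le lines lines.length (i + 1) [lines[i]'hi]
              exact congrArg _
                (ih g (iter_run_blocks_inner lines lines.length (i + 1) [lines[i]'hi]).2
                  (by omega) (by omega))
            · exact ih g (i + 1) (by omega) (by omega)
          · rfl

-- Combined invariant: running the fold from index i reproduces A's outer loop (none
-- state) resp. A's inner loop followed by the outer loop (open-block state, whose
-- last line ends with a backslash).  k bounds lines.length - i.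
theorem iter_run_blocks_main (k : Nat) : ∀ (lines : List String) (i : Nat),
    lines.length - i ≤ k →
    (∀ out, iter_run_blocks_finish
        ((lines.drop i).foldl iter_run_blocks_step (none, out)) =
      out ++ iter_run_blocks_outer lines lines.length i) ∧
    (∀ chunk out,
      PySem.Str.endswith (PySem.Str.rstrip chunk.getLast!) "\\" = true →
      iter_run_blocks_finish
          ((lines.drop i).foldl iter_run_blocks_step (some chunk, out)) =
        out ++ PySem.Str.join "\n"
            (iter_run_blocks_inner lines lines.length i chunk).1 ::
          iter_run_blocks_outer lines lines.length
            (iter_run_blocks_inner lines lines.length i chunk).2) := by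
  have houter0 : ∀ (lines : List String) (i : Nat), lines.length ≤ i →
      iter_run_blocks_outer lines lines.length i = [] := by
    intro lines i hle
    rw [iter_run_blocks_outer_fuel lines lines.length 0 i (by omega) (by omega)]
    rfl
  have hinner0 : ∀ (lines : List String) (i : Nat) (chunk : List String),
      lines.length ≤ i →
      iter_run_blocks_inner lines lines.length i chunk = (chunk, i) := by
    intro lines i chunk hle
    exact iter_run_blocks_inner_stop lines lines.length i chunk (by omega)
  induction k with
  | zero =>
      intro lines i hk
      have hi : lines.length ≤ i := by omega
      rw [List.drop_eq_nil_of_le hi]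
      refine ⟨fun out => ?_, fun chunk out _ => ?_⟩
      · rw [houter0 lines i hi]; simp [iter_run_blocks_finish]
      · rw [hinner0 lines i chunk hi, houter0 lines i hi]
        simp [iter_run_blocks_finish]
  | succ k ih =>
      intro lines i hk
      by_cases hi : i < lines.length
      · have hdrop := List.drop_eq_getElem_cons hi
        have ih' := ih lines (i + 1) (by omega)
        -- one sufficient-fuel unfolding of the outer loop at index i
        have houter1 : iter_run_blocks_outer lines lines.length i =
            iter_run_blocks_outer lines (lines.length - i) i := by
          exact iter_run_blocks_outer_fuel lines lines.length (lines.length - i) i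
            (by omega) (by omega)
        have hstep : ∃ f, lines.length - i = f + 1 := ⟨lines.length - i - 1, by omega⟩
        obtain ⟨f, hf⟩ := hstep
        have hfsuff : lines.length ≤ (i + 1) + f := by omega
        constructor
        · intro out
          rw [hdrop, List.foldl_cons]
          rw [houter1, hf]
          simp only [iter_run_blocks_outer, iter_run_blocks_step]
          rw [dif_pos hi]
          by_cases hrun :
              PySem.Str.startswith (PySem.Str.upper (PySem.Str.lstrip lines[i])) "RUN" = true
          · rw [if_pos hrun, if_pos hrun]
            by_cases hbs : PySem.Str.endswith (PySem.Str.rstrip lines[i]) "\\" = true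
            · rw [if_pos hbs]
              have h2 := ih'.2 [lines[i]] out (by simpa using hbs)
              rw [h2]
              have hle := iter_run_blocks_inner_le lines lines.length (i + 1) [lines[i]]
              rw [iter_run_blocks_outer_fuel lines f lines.length
                (iter_run_blocks_inner lines lines.length (i + 1) [lines[i]]).2
                (by omega) (by omega)]
            · rw [if_neg hbs]
              have h1 := ih'.1 (out ++ [PySem.Str.join "\n" [lines[i]]])
              rw [h1]
              have hinner1 :
                  iter_run_blocks_inner lines lines.length (i + 1) [lines[i]] =
                    ([lines[i]], i + 1) := by
                exact iter_run_blocks_inner_stop lines lines.length (i + 1) _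
                  (by rintro ⟨-, hc⟩; exact hbs (by simpa using hc))
              rw [hinner1]
              rw [iter_run_blocks_outer_fuel lines f lines.length (i + 1)
                (by omega) (by omega)]
              simp
          · rw [if_neg hrun, if_neg hrun]
            rw [ih'.1 out]
            rw [iter_run_blocks_outer_fuel lines f lines.length (i + 1)
              (by omega) (by omega)]
        · intro chunk out hlast
          rw [hdrop, List.foldl_cons]
          have hinner1 : iter_run_blocks_inner lines lines.length i chunk =
              iter_run_blocks_inner lines lines.length (i + 1) (chunk ++ [lines[i]]) := by
            rw [iter_run_blocks_inner_fuel lines lines.length (f + 1) i chunk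
              (by omega) (by omega)]
            rw [iter_run_blocks_inner, dif_pos ⟨hi, hlast⟩]
            exact iter_run_blocks_inner_fuel lines f lines.length (i + 1) _
              (by omega) (by omega)
          rw [hinner1]
          simp only [iter_run_blocks_step]
          by_cases hbs : PySem.Str.endswith (PySem.Str.rstrip lines[i]) "\\" = true
          · rw [if_pos hbs]
            exact ih'.2 (chunk ++ [lines[i]]) out (by simpa using hbs)
          · rw [if_neg hbs]
            rw [ih'.1 (out ++ [PySem.Str.join "\n" (chunk ++ [lines[i]])])]
            have hinner2 :
                iter_run_blocks_inner lines lines.length (i + 1) (chunk ++ [lines[i]]) =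
                  (chunk ++ [lines[i]], i + 1) := by
              exact iter_run_blocks_inner_stop lines lines.length (i + 1) _
                (by rintro ⟨-, hc⟩; exact hbs (by simpa using hc))
            rw [hinner2]
            simp
      · have hle : lines.length ≤ i := by omega
        rw [List.drop_eq_nil_of_le hle]
        refine ⟨fun out => ?_, fun chunk out _ => ?_⟩
        · rw [houter0 lines i hle]; simp [iter_run_blocks_finish]
        · rw [hinner0 lines i chunk hle, houter0 lines i hle]
          simp [iter_run_blocks_finish]

-- ===== VERDICT (by name: the statement is the Claim_ definition above) =====
theorem iter_run_blocks_spec : Claim_equal_iter_run_blocks := by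
  intro text _
  unfold Spec_iter_run_blocks iter_run_blocks iter_run_blocks_alt
  have h := (iter_run_blocks_main (PySem.Str.splitlines text).length
      (PySem.Str.splitlines text) 0 (by omega)).1 []
  simp only [List.drop_zero] at h
  simp [h]
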